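-- pv_equiv track=rewrite | github.com/lmfaber/AdventOfCode2023 | solutions/cube_conundrum.py | find_possible_games
-- ===== SOURCE A (Python) =====
-- def find_possible_games(loaded_bag, games_info):
--     possible_games: list[int] = []
--     for number_game, set in games_info.items():
--         is_possible_game: bool = True
--         for number_set, drawing in set.items():
--             for cube_color, number_cubes in drawing.items():
--                 if loaded_bag[cube_color] < number_cubes:
--                     is_possible_game = False
--         if is_possible_game:
--             possible_games.append(number_game)
--     return possible_games
-- ===== SOURCE B (Python) =====
-- def find_possible_games(loaded_bag, games_info):
--     possible_games = []
--     for number_game, game_set in games_info.items():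
--         max_required = {}
--         for number_set, drawing in game_set.items():
--             for cube_color, number_cubes in drawing.items():
--                 if number_cubes > max_required.get(cube_color, number_cubes - 1):
--                     max_required[cube_color] = number_cubes
--         if all(loaded_bag[cube_color] >= needed
--                for cube_color, needed in max_required.items()):
--             possible_games.append(number_game)
--     return possible_games
-- ===== Notes on version B (the rewrite author's own statement) =====
-- stated objective: alternative
-- what changed: A interleaves checking and flag-keeping in one nested scan; B first reduces each game to a dict of per-color maximum requirements and then decides possibility in a separate comparison pass against the bag.
import Mathlib
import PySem

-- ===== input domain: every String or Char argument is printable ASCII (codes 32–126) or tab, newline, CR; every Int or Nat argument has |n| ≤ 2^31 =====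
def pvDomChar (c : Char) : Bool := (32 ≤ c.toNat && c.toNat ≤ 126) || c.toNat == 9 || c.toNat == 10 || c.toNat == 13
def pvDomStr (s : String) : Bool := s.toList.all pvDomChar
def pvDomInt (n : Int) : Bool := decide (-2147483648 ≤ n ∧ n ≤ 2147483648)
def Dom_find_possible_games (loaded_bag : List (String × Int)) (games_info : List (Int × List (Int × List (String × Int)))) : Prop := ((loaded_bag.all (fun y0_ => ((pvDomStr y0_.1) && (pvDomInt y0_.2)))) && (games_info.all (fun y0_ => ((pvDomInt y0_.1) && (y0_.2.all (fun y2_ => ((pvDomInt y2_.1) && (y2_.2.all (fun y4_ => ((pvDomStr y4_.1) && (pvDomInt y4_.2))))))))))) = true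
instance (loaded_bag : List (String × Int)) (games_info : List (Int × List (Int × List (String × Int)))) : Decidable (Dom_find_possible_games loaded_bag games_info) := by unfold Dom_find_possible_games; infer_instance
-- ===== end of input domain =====

-- B reduces each game to a dict of per-color maximum requirements, then compares against the bag in a separate pass (alternative decomposition, same cost).


-- ===== PORT A =====
-- loaded_bag[cube_color]: Python dict subscript = first-match lookup; under Pre_ the key is
-- always present, so the default (which makes the comparison false) is never consulted.
def find_possible_games (loaded_bag : List (String × Int)) (games_info : List (Int × List (Int × List (String × Int)))) : List Int :=
  games_info.foldl (fun possible_games g =>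
    let is_possible_game : Bool := g.2.foldl (fun b s =>
      s.2.foldl (fun b c =>
        if (PySem.Dict.mk loaded_bag).getD c.1 c.2 < c.2 then false else b) b) true
    if is_possible_game then possible_games ++ [g.1] else possible_games) []

-- ===== PORT B =====
-- max_required: dict of per-color maximum number_cubes over all of a game's drawings
def fpg_max_required (game_set : List (Int × List (String × Int))) : PySem.Dict String Int :=
  game_set.foldl (fun d s =>
    s.2.foldl (fun d c =>
      if c.2 > d.getD c.1 (c.2 - 1) then d.insert c.1 c.2 else d) d) PySem.Dict.empty

def find_possible_games_alt (loaded_bag : List (String × Int)) (games_info : List (Int × List (Int × List (String × Int)))) : List Int :=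
  games_info.foldl (fun possible_games g =>
    if (fpg_max_required g.2).items.all
        (fun p => decide (p.2 ≤ (PySem.Dict.mk loaded_bag).getD p.1 (p.2 - 1)))
    then possible_games ++ [g.1] else possible_games) []

-- ===== PRECONDITION & SPEC =====
-- Pre_ excludes exactly the inputs where some drawing mentions a color absent from
-- loaded_bag: there Python A raises KeyError at loaded_bag[cube_color] (B raises too).
def Pre_find_possible_games (loaded_bag : List (String × Int)) (games_info : List (Int × List (Int × List (String × Int)))) : Prop :=
  (games_info.all (fun g => g.2.all (fun s => s.2.all (fun c =>
    ((PySem.Dict.mk loaded_bag).get? c.1).isSome)))) = true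
instance (loaded_bag : List (String × Int)) (games_info : List (Int × List (Int × List (String × Int)))) : Decidable (Pre_find_possible_games loaded_bag games_info) := by unfold Pre_find_possible_games; infer_instance

def pvWitness_find_possible_games : (List (String × Int)) × (List (Int × List (Int × List (String × Int)))) :=
  ([("red", 5), ("blue", 2)], [(1, [(1, [("red", 3), ("blue", 1)]), (2, [("red", 6)])]), (2, [(1, [("blue", 2)])])])

def Spec_find_possible_games (loaded_bag : List (String × Int)) (games_info : List (Int × List (Int × List (String × Int)))) (out : List Int) : Prop := out = find_possible_games_alt loaded_bag games_info
instance (loaded_bag : List (String × Int)) (games_info : List (Int × List (Int × List (String × Int)))) (out : List Int) : Decidable (Spec_find_possible_games loaded_bag games_info out) := by unfold Spec_find_possible_games; infer_instance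

-- ===== CLAIM (what is proved, stated in full; the proofs are below) =====
def Claim_equal_find_possible_games : Prop := ∀ (loaded_bag : List (String × Int)) (games_info : List (Int × List (Int × List (String × Int)))), Dom_find_possible_games loaded_bag games_info → Pre_find_possible_games loaded_bag games_info → Spec_find_possible_games loaded_bag games_info (find_possible_games loaded_bag games_info)

-- ===== LEMMAS AND PROOFS =====

theorem fpg_foldl_and {α : Type} (g : α → Bool) (l : List α) (b : Bool) :
    l.foldl (fun b x => b && g x) b = (b && l.all g) := by
  induction l generalizing b with
  | nil => simp
  | cons x t ih => simp [List.foldl_cons, ih, Bool.and_assoc]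

-- the per-game flag of A, as one all-expression
theorem fpg_flagA (loaded_bag : List (String × Int)) (gs : List (Int × List (String × Int))) :
    gs.foldl (fun b s =>
      s.2.foldl (fun b c =>
        if (PySem.Dict.mk loaded_bag).getD c.1 c.2 < c.2 then false else b) b) true
    = gs.all (fun s => s.2.all (fun c =>
        !((PySem.Dict.mk loaded_bag).getD c.1 c.2 < c.2 : Bool))) := by
  have hstep : ∀ (b : Bool) (c : String × Int),
      (if (PySem.Dict.mk loaded_bag).getD c.1 c.2 < c.2 then false else b)
        = (b && !((PySem.Dict.mk loaded_bag).getD c.1 c.2 < c.2 : Bool)) := by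
    intro b c; split_ifs with h <;> simp [h]
  simp only [hstep]
  simp only [fpg_foldl_and]
  simp

-- predicate B checks on the max_required dict
def fpg_predB (loaded_bag : List (String × Int)) (p : String × Int) : Bool :=
  decide (p.2 ≤ (PySem.Dict.mk loaded_bag).getD p.1 (p.2 - 1))

-- one max-update step of B, seen through the final all-check
theorem fpg_step (loaded_bag : List (String × Int)) (d : PySem.Dict String Int)
    (c : String) (n v : Int) (hnd : d.keys.Nodup)
    (hv : (PySem.Dict.mk loaded_bag).get? c = some v) :
    (if n > d.getD c (n - 1) then d.insert c n else d).items.all (fpg_predB loaded_bag)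
      = (d.items.all (fpg_predB loaded_bag) && decide (n ≤ v)) := by
  have hpred : fpg_predB loaded_bag (c, n) = decide (n ≤ v) := by
    simp [fpg_predB, PySem.Dict.getD_eq_get?_getD, hv]
  by_cases hcond : d.getD c (n - 1) < n
  · simp only [gt_iff_lt, hcond, if_pos]
    by_cases hcont : d.contains c = true
    · have hsome : (d.get? c).isSome = true := by
        rw [← PySem.Dict.contains_eq_isSome_get?]; exact hcont
      obtain ⟨old, hold⟩ := Option.isSome_iff_exists.mp hsome
      have hmem : (c, old) ∈ d.items := PySem.Dict.mem_items_of_get?_eq_some d hold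
      have holdD : d.getD c (n - 1) = old := by
        simp [PySem.Dict.getD_eq_get?_getD, hold]
      rw [PySem.Dict.items_insert_of_contains d n hcont]
      by_cases hnv : n ≤ v
      · simp only [hnv, decide_true, Bool.and_true]
        rw [Bool.eq_iff_iff]
        simp only [List.all_eq_true, List.mem_map]
        constructor
        · intro hall p hp
          by_cases hk : p.1 = c
          · have hpo : p.2 = old := by
              have h1 : d.get? p.1 = some p.2 := by
                have : (p.1, p.2) ∈ d.items := by simpa using hp
                exact PySem.Dict.get?_of_mem_items d this hnd
              rw [hk, hold] at h1
              simpa using h1.symm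
            have : fpg_predB loaded_bag p = decide (p.2 ≤ v) := by
              simp [fpg_predB, hk, PySem.Dict.getD_eq_get?_getD, hv]
            rw [this, hpo]
            simp; omega
          · have := hall _ ⟨p, hp, rfl⟩
            simpa [hk] using this
        · intro hall q ⟨p, hp, hq⟩
          by_cases hk : p.1 = c
          · have : q = (c, n) := by simp [← hq, hk]
            rw [this, hpred]
            simpa using hnv
          · have : q = p := by simp [← hq, hk]
            rw [this]; exact hall p hp
      · simp only [hnv, decide_false, Bool.and_false]
        rw [List.all_eq_false]
        refine ⟨(c, n), ?_, ?_⟩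
        · exact List.mem_map.mpr ⟨(c, old), hmem, by simp⟩
        · simp [hpred, hnv]
    · rw [PySem.Dict.items_insert_of_not_contains d n (by simpa using hcont), List.all_append]
      simp [hpred]
  · simp only [gt_iff_lt, hcond, if_neg, not_false_eq_true]
    by_cases hcont : d.contains c = true
    · have hsome : (d.get? c).isSome = true := by
        rw [← PySem.Dict.contains_eq_isSome_get?]; exact hcont
      obtain ⟨old, hold⟩ := Option.isSome_iff_exists.mp hsome
      have hmem : (c, old) ∈ d.items := PySem.Dict.mem_items_of_get?_eq_some d hold
      have holdD : d.getD c (n - 1) = old := by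
        simp [PySem.Dict.getD_eq_get?_getD, hold]
      cases ha : d.items.all (fpg_predB loaded_bag) with
      | false => simp
      | true =>
        have hpold : fpg_predB loaded_bag (c, old) = true :=
          (List.all_eq_true.mp ha) _ hmem
        have hov : old ≤ v := by
          have h2 : fpg_predB loaded_bag (c, old) = decide (old ≤ v) := by
            simp [fpg_predB, PySem.Dict.getD_eq_get?_getD, hv]
          rw [h2] at hpold
          exact of_decide_eq_true hpold
        have hnv : n ≤ v := by omega
        simp [hnv]
    · exfalso
      have : d.getD c (n - 1) = n - 1 :=
        PySem.Dict.getD_of_not_contains d (n - 1) (by simpa using hcont)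
      omega

-- nodup keys are preserved by B's max-update step
theorem fpg_step_nodup (d : PySem.Dict String Int) (c : String) (n : Int)
    (hnd : d.keys.Nodup) :
    (if n > d.getD c (n - 1) then d.insert c n else d).keys.Nodup := by
  by_cases hcond : d.getD c (n - 1) < n
  · simpa [hcond] using PySem.Dict.nodup_keys_insert d c n hnd
  · simpa [hcond] using hnd

-- B's inner (drawing-level) fold, through the all-check
theorem fpg_inner (loaded_bag : List (String × Int)) (pairs : List (String × Int))
    (d : PySem.Dict String Int) (hnd : d.keys.Nodup)
    (hp : ∀ c ∈ pairs, ((PySem.Dict.mk loaded_bag).get? c.1).isSome = true) :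
    ((pairs.foldl (fun d c =>
        if c.2 > d.getD c.1 (c.2 - 1) then d.insert c.1 c.2 else d) d).items.all
          (fpg_predB loaded_bag)
      = (d.items.all (fpg_predB loaded_bag)
          && pairs.all (fun c =>
              !((PySem.Dict.mk loaded_bag).getD c.1 c.2 < c.2 : Bool))))
    ∧ (pairs.foldl (fun d c =>
        if c.2 > d.getD c.1 (c.2 - 1) then d.insert c.1 c.2 else d) d).keys.Nodup := by
  induction pairs generalizing d with
  | nil => simpa using hnd
  | cons c t ih =>
    obtain ⟨v, hv⟩ := Option.isSome_iff_exists.mp (hp c List.mem_cons_self)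
    have hbag : (!((PySem.Dict.mk loaded_bag).getD c.1 c.2 < c.2 : Bool)) = decide (c.2 ≤ v) := by
      rw [PySem.Dict.getD_eq_get?_getD, hv, Option.getD_some]
      by_cases h : v < c.2 <;> simp [h] <;> omega
    have hstep := fpg_step loaded_bag d c.1 c.2 v hnd hv
    have hsn := fpg_step_nodup d c.1 c.2 hnd
    have iht := ih _ hsn (fun x hx => hp x (List.mem_cons_of_mem _ hx))
    refine ⟨?_, iht.2⟩
    simp only [List.foldl_cons, List.all_cons, iht.1, hstep, Bool.and_assoc]
    rw [hbag]

-- per-game: B's dict check equals A's flag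
theorem fpg_game (loaded_bag : List (String × Int)) (gs : List (Int × List (String × Int)))
    (hp : ∀ s ∈ gs, ∀ c ∈ s.2, ((PySem.Dict.mk loaded_bag).get? c.1).isSome = true) :
    (fpg_max_required gs).items.all (fpg_predB loaded_bag)
      = gs.foldl (fun b s =>
          s.2.foldl (fun b c =>
            if (PySem.Dict.mk loaded_bag).getD c.1 c.2 < c.2 then false else b) b) true := by
  rw [fpg_flagA]
  unfold fpg_max_required
  have h : ∀ (gs' : List (Int × List (String × Int))),
      (∀ s ∈ gs', ∀ c ∈ s.2, ((PySem.Dict.mk loaded_bag).get? c.1).isSome = true) →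
      ∀ (d : PySem.Dict String Int), d.keys.Nodup →
      ((gs'.foldl (fun d s => s.2.foldl (fun d c =>
          if c.2 > d.getD c.1 (c.2 - 1) then d.insert c.1 c.2 else d) d) d).items.all
            (fpg_predB loaded_bag)
        = (d.items.all (fpg_predB loaded_bag)
            && gs'.all (fun s => s.2.all (fun c =>
                !((PySem.Dict.mk loaded_bag).getD c.1 c.2 < c.2 : Bool)))))
      ∧ (gs'.foldl (fun d s => s.2.foldl (fun d c =>
          if c.2 > d.getD c.1 (c.2 - 1) then d.insert c.1 c.2 else d) d) d).keys.Nodup := by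
    intro gs' hp'
    induction gs' with
    | nil => intro d hnd; simpa using hnd
    | cons s t ih =>
      intro d hnd
      have hinner := fpg_inner loaded_bag s.2 d hnd
        (fun c hc => hp' s List.mem_cons_self c hc)
      have iht := ih (fun s' hs' c hc => hp' s' (List.mem_cons_of_mem _ hs') c hc)
        _ hinner.2
      refine ⟨?_, iht.2⟩
      simp only [List.foldl_cons, List.all_cons, iht.1, hinner.1, Bool.and_assoc]
  have := (h gs hp PySem.Dict.empty (by simp [PySem.Dict.empty])).1
  simpa [PySem.Dict.empty] using this

-- ===== VERDICT (by name: the statement is the Claim_ definition above) =====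
theorem find_possible_games_spec : Claim_equal_find_possible_games := by
  intro loaded_bag games_info _ hpre
  unfold Spec_find_possible_games find_possible_games find_possible_games_alt
  have hpre' := List.all_eq_true.mp hpre
  apply PySem.List.foldl_congr_mem
  intro acc g hg
  have hall : ∀ s ∈ g.2, ∀ c ∈ s.2, ((PySem.Dict.mk loaded_bag).get? c.1).isSome = true := by
    intro s hs c hc
    have h1 := List.all_eq_true.mp (hpre' g hg) s hs
    exact List.all_eq_true.mp h1 c hc
  have hflag := fpg_game loaded_bag g.2 hall
  unfold fpg_predB at hflag
  dsimp only []
  rw [← hflag]
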